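-- pv_equiv track=rewrite | github.com/sueszli/vector-database-benchmark | dataset/python-mutated/sobol.py | i4_bit_lo0
-- ===== SOURCE A (Python) =====
-- def i4_bit_lo0(n):
--     if False:
--         while True:
--             i = 10
--     '\n     I4_BIT_LO0 returns the position of the low 0 bit base 2 in an I4.\n\n      Discussion:\n\n        An I4 is an integer ( kind = 4 ) value.\n\n      Example:\n\n           N    Binary    Lo 0\n        ----    --------  ----\n           0           0     1\n           1           1     2\n           2          10     1\n           3          11     3\n           4         100     1\n           5         101     2\n           6         110     1\n           7         111     4\n           8        1000     1\n           9        1001     2\n          10        1010     1\n          11        1011     3\n          12        1100     1\n          13        1101     2\n          14        1110     1\n          15        1111     5\n          16       10000     1\n          17       10001     2\n        1023  1111111111    11\n        1024 10000000000     1\n        1025 10000000001     2\n\n      Licensing:\n\n        This code is distributed under the GNU LGPL license.\n\n      Modified:\n\n        08 February 2018\n\n      Author:\n\n        John Burkardt\n\n      Parameters:\n\n        Input, integer N, the integer to be measured.\n        N should be nonnegative.\n\n        Output, integer BIT, the position of the low 1 bit.\n\n    '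
--     bit = 0
--     i = n
--     while True:
--         bit = bit + 1
--         i2 = i // 2
--         if i == 2 * i2:
--             break
--         i = i2
--     return bit
-- ===== SOURCE B (Python) =====
-- def i4_bit_lo0(n):
--     m = n + 1
--     return (m & -m).bit_length()
-- ===== Notes on version B (the rewrite author's own statement) =====
-- stated objective: simpler
-- what changed: Replaces the while-loop halving scan with the closed form ((n+1) & -(n+1)).bit_length(), using the identity that the lowest zero bit of n is the lowest set bit of n+1.
-- outside the precondition, e.g. on i4_bit_lo0(-1): A does not finish within the time limit, B returns 0
import Mathlib
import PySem

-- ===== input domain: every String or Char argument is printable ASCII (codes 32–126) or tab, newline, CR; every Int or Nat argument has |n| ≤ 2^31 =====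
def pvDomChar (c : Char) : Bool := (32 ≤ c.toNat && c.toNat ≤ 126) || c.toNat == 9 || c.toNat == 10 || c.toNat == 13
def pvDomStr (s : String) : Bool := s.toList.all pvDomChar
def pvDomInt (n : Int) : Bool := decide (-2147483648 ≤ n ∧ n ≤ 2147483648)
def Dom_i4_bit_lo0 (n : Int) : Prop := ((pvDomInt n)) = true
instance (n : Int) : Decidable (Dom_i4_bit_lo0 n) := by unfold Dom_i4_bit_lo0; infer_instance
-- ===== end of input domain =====

-- B replaces A's while-loop bit scan with the one-line closed form ((n+1) & -(n+1)).bit_length() (simpler).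

-- ===== PORT A =====
-- A's `while True:` loop, transliterated with fuel; on every input admitted by
-- Pre_ the loop runs at most n.natAbs + 1 times, so the fuel is never exhausted.
def i4_bit_lo0_loop : Nat → Int → Int → Int
  | 0, bit, _ => bit
  | fuel + 1, bit, i =>
    let bit' := bit + 1
    let i2 := PySem.Int.floordiv i 2
    if i = 2 * i2 then bit' else i4_bit_lo0_loop fuel bit' i2

def i4_bit_lo0 (n : Int) : Int := i4_bit_lo0_loop (n.natAbs + 1) 0 n

-- ===== PORT B =====
def i4_bit_lo0_alt (n : Int) : Int :=
  let m := n + 1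
  Int.ofNat (PySem.Int.bitLength (PySem.Int.band m (-m)))

-- ===== PRECONDITION & SPEC =====
-- Pre_ excludes exactly n = -1, on which A's while-loop never terminates
-- (i stays -1 forever); A returns normally on every other integer.
def Pre_i4_bit_lo0 (n : Int) : Prop := n ≠ -1
instance (n : Int) : Decidable (Pre_i4_bit_lo0 n) := by unfold Pre_i4_bit_lo0; infer_instance
def pvWitness_i4_bit_lo0 : Int := (7)

def Spec_i4_bit_lo0 (n : Int) (out : Int) : Prop := out = i4_bit_lo0_alt n
instance (n : Int) (out : Int) : Decidable (Spec_i4_bit_lo0 n out) := by unfold Spec_i4_bit_lo0; infer_instance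

-- ===== CLAIM (what is proved, stated in full; the proofs are below) =====
def Claim_equal_i4_bit_lo0 : Prop := ∀ (n : Int), Dom_i4_bit_lo0 n → Pre_i4_bit_lo0 n → Spec_i4_bit_lo0 n (i4_bit_lo0 n)

-- ===== LEMMAS AND PROOFS =====

-- lowest set bit of k, as Source B computes it at the Nat level: k & -k = k - (k &&& (k-1))
def pvLowBit (k : Nat) : Nat := k - (k &&& (k - 1))

theorem pvLand_pred_of_odd (k : Nat) (hk : k % 2 = 1) : k &&& (k - 1) = k - 1 := by
  apply Nat.eq_of_testBit_eq
  intro i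
  rw [Nat.testBit_land]
  cases i with
  | zero =>
      have h0 : (k - 1) % 2 = 0 := by omega
      simp [Nat.testBit_zero, h0]
  | succ i =>
      simp only [Nat.testBit_add_one]
      have hhalf : k / 2 = (k - 1) / 2 := by omega
      rw [hhalf, Bool.and_self]

theorem pvLand_pred_of_even (k : Nat) (hk : k % 2 = 0) (hpos : 0 < k) :
    k &&& (k - 1) = 2 * (k / 2 &&& (k / 2 - 1)) := by
  apply Nat.eq_of_testBit_eq
  intro i
  rw [Nat.testBit_land]
  cases i with
  | zero =>
      simp [Nat.testBit_zero, hk, Nat.mul_mod_right]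
  | succ i =>
      simp only [Nat.testBit_add_one]
      have h1 : (k - 1) / 2 = k / 2 - 1 := by omega
      have h2 : 2 * (k / 2 &&& (k / 2 - 1)) / 2 = k / 2 &&& (k / 2 - 1) := by omega
      rw [h1, h2, Nat.testBit_land]

theorem pvLowBit_odd (k : Nat) (hk : k % 2 = 1) : pvLowBit k = 1 := by
  unfold pvLowBit
  rw [pvLand_pred_of_odd k hk]
  omega

theorem pvLowBit_even (k : Nat) (hk : k % 2 = 0) (hpos : 0 < k) :
    pvLowBit k = 2 * pvLowBit (k / 2) := by
  unfold pvLowBit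
  rw [pvLand_pred_of_even k hk hpos]
  have h := Nat.and_le_left (n := k / 2) (m := k / 2 - 1)
  omega

theorem pvLowBit_pos (k : Nat) (hpos : 0 < k) : 0 < pvLowBit k := by
  induction k using Nat.strong_induction_on with
  | _ k ih =>
    rcases Nat.even_or_odd k with he | ho
    · have hk : k % 2 = 0 := Nat.even_iff.mp he
      rw [pvLowBit_even k hk hpos]
      have := ih (k / 2) (by omega) (by omega)
      omega
    · rw [pvLowBit_odd k (Nat.odd_iff.mp ho)]; omega

-- B's value on a nonnegative input, reduced to pvLowBit
theorem pvAlt_ofNat (k : Nat) :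
    i4_bit_lo0_alt (k : Int) = Int.ofNat (PySem.Int.bitLength ((pvLowBit (k + 1) : Nat) : Int)) := by
  show Int.ofNat (PySem.Int.bitLength (PySem.Int.band ((k : Int) + 1) (-((k : Int) + 1)))) = _
  have h1 : (0 : Int) ≤ (k : Int) + 1 := by omega
  have h2 : ¬ (0 : Int) ≤ -((k : Int) + 1) := by omega
  simp only [PySem.Int.band]
  rw [if_pos h1, if_neg h2]
  have e1 : ((k : Int) + 1).toNat = k + 1 := by omega
  have e2 : (-(-((k : Int) + 1)) - 1).toNat = k := by omega
  rw [e1, e2]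
  unfold pvLowBit
  simp

-- B's value satisfies the loop's recursion on Nat
theorem pvAlt_even (k : Nat) (hk : k % 2 = 0) : i4_bit_lo0_alt (k : Int) = 1 := by
  rw [pvAlt_ofNat, pvLowBit_odd (k + 1) (by omega)]
  decide

theorem pvAlt_odd (k : Nat) (hk : k % 2 = 1) :
    i4_bit_lo0_alt (k : Int) = i4_bit_lo0_alt ((k / 2 : Nat) : Int) + 1 := by
  rw [pvAlt_ofNat, pvAlt_ofNat]
  have h1 : (k + 1) % 2 = 0 := by omega
  rw [pvLowBit_even (k + 1) h1 (by omega)]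
  have h2 : (k + 1) / 2 = k / 2 + 1 := by omega
  rw [h2]
  have hp : 0 < pvLowBit (k / 2 + 1) := pvLowBit_pos _ (by omega)
  have hb := PySem.Int.bitLength_natCast (m := 2 * pvLowBit (k / 2 + 1)) (by omega)
  have h3 : 2 * pvLowBit (k / 2 + 1) / 2 = pvLowBit (k / 2 + 1) := by omega
  rw [h3] at hb
  rw [hb]
  simp only [Int.ofNat_eq_natCast]
  push_cast
  ring

-- the fueled loop computes B's value, given enough fuel
theorem pvLoop_eq (k : Nat) : ∀ (fuel : Nat) (bit : Int), k < fuel →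
    i4_bit_lo0_loop fuel bit (k : Int) = bit + i4_bit_lo0_alt (k : Int) := by
  induction k using Nat.strong_induction_on with
  | _ k ih =>
    intro fuel bit hfuel
    obtain ⟨f, rfl⟩ : ∃ f, fuel = f + 1 := ⟨fuel - 1, by omega⟩
    show (let bit' := bit + 1;
          let i2 := PySem.Int.floordiv (k : Int) 2;
          if (k : Int) = 2 * i2 then bit' else i4_bit_lo0_loop f bit' i2) = _
    have hdiv : PySem.Int.floordiv (k : Int) 2 = ((k / 2 : Nat) : Int) :=
      PySem.Int.floordiv_natCast k 2
    simp only [hdiv]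
    rcases Nat.even_or_odd k with he | ho
    · have hk : k % 2 = 0 := Nat.even_iff.mp he
      have hcond : (k : Int) = 2 * ((k / 2 : Nat) : Int) := by push_cast; omega
      rw [if_pos hcond, pvAlt_even k hk]
    · have hk : k % 2 = 1 := Nat.odd_iff.mp ho
      have hcond : ¬ ((k : Int) = 2 * ((k / 2 : Nat) : Int)) := by push_cast; omega
      rw [if_neg hcond]
      rw [ih (k / 2) (by omega) f (bit + 1) (by omega), pvAlt_odd k hk]
      ring

-- B's value on an input n = -(j+1) ≤ -2, reduced to pvLowBit of j = -n-1
theorem pvAltNeg_ofNat (j : Nat) (hj : 1 ≤ j) :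
    i4_bit_lo0_alt (-((j : Int) + 1)) = Int.ofNat (PySem.Int.bitLength ((pvLowBit j : Nat) : Int)) := by
  show Int.ofNat (PySem.Int.bitLength (PySem.Int.band (-((j : Int) + 1) + 1) (-(-((j : Int) + 1) + 1)))) = _
  have hm : -((j : Int) + 1) + 1 = -(j : Int) := by ring
  rw [hm]
  have h1 : ¬ (0 : Int) ≤ -(j : Int) := by omega
  have h2 : (0 : Int) ≤ -(-(j : Int)) := by omega
  simp only [PySem.Int.band]
  rw [if_neg h1, if_pos h2]
  have e1 : (-(-(j : Int))).toNat = j := by omega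
  have e2 : (-(-(j : Int)) - 1).toNat = j - 1 := by omega
  rw [e1, e2]
  unfold pvLowBit
  simp

theorem pvAltNeg_odd (j : Nat) (hj : j % 2 = 1) : i4_bit_lo0_alt (-((j : Int) + 1)) = 1 := by
  rw [pvAltNeg_ofNat j (by omega), pvLowBit_odd j hj]
  decide

theorem pvAltNeg_even (j : Nat) (hj : j % 2 = 0) (h1 : 1 ≤ j) :
    i4_bit_lo0_alt (-((j : Int) + 1)) = i4_bit_lo0_alt (-(((j / 2 : Nat) : Int) + 1)) + 1 := by
  rw [pvAltNeg_ofNat j h1, pvAltNeg_ofNat (j / 2) (by omega)]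
  rw [pvLowBit_even j hj (by omega)]
  have hp : 0 < pvLowBit (j / 2) := pvLowBit_pos _ (by omega)
  have hb := PySem.Int.bitLength_natCast (m := 2 * pvLowBit (j / 2)) (by omega)
  have h3 : 2 * pvLowBit (j / 2) / 2 = pvLowBit (j / 2) := by omega
  rw [h3] at hb
  rw [hb]
  simp only [Int.ofNat_eq_natCast]
  push_cast
  ring

-- the fueled loop computes B's value on negative inputs n = -(j+1), j ≥ 1
theorem pvLoopNeg_eq (j : Nat) : ∀ (fuel : Nat) (bit : Int), 1 ≤ j → j < fuel →
    i4_bit_lo0_loop fuel bit (-((j : Int) + 1)) = bit + i4_bit_lo0_alt (-((j : Int) + 1)) := by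
  induction j using Nat.strong_induction_on with
  | _ j ih =>
    intro fuel bit hj hfuel
    obtain ⟨f, rfl⟩ : ∃ f, fuel = f + 1 := ⟨fuel - 1, by omega⟩
    show (let bit' := bit + 1;
          let i2 := PySem.Int.floordiv (-((j : Int) + 1)) 2;
          if -((j : Int) + 1) = 2 * i2 then bit' else i4_bit_lo0_loop f bit' i2) = _
    have hdiv : PySem.Int.floordiv (-((j : Int) + 1)) 2 = (-((j : Int) + 1)) / 2 :=
      PySem.Int.floordiv_eq_ediv_of_pos (by omega)
    simp only [hdiv]
    rcases Nat.even_or_odd j with he | ho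
    · have hk : j % 2 = 0 := Nat.even_iff.mp he
      have hcond : ¬ (-((j : Int) + 1) = 2 * (-((j : Int) + 1) / 2)) := by omega
      rw [if_neg hcond]
      have hi2 : -((j : Int) + 1) / 2 = -(((j / 2 : Nat) : Int) + 1) := by
        have : ((j / 2 : Nat) : Int) = (j : Int) / 2 := by push_cast; omega
        omega
      rw [hi2]
      rw [ih (j / 2) (by omega) f (bit + 1) (by omega) (by omega), pvAltNeg_even j hk hj]
      ring
    · have hk : j % 2 = 1 := Nat.odd_iff.mp ho
      have hcond : -((j : Int) + 1) = 2 * (-((j : Int) + 1) / 2) := by omega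
      rw [if_pos hcond, pvAltNeg_odd j hk]

-- ===== VERDICT (by name: the statement is the Claim_ definition above) =====
theorem i4_bit_lo0_spec : Claim_equal_i4_bit_lo0 := by
  intro n _ hpre
  unfold Spec_i4_bit_lo0
  rcases le_or_gt 0 n with h0 | h0
  · obtain ⟨k, rfl⟩ : ∃ k : Nat, n = (k : Int) := ⟨n.toNat, by omega⟩
    unfold i4_bit_lo0
    have hfuel : k < ((k : Int)).natAbs + 1 := by omega
    rw [pvLoop_eq k _ 0 hfuel]
    ring
  · have hn2 : n ≤ -2 := by
      rcases eq_or_ne n (-1) with h | h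
      · exact absurd h hpre
      · omega
    obtain ⟨j, hj, rfl⟩ : ∃ j : Nat, 1 ≤ j ∧ n = -((j : Int) + 1) := ⟨(-n - 1).toNat, by omega, by omega⟩
    unfold i4_bit_lo0
    have hfuel : j < (-((j : Int) + 1)).natAbs + 1 := by omega
    rw [pvLoopNeg_eq j _ 0 hj hfuel]
    ring
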